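-- pv_equiv track=rewrite | github.com/AnimeshKC/CodingPractice | uniqueConcatenationMax.py | uniquePair
-- ===== SOURCE A (Python) =====
-- def uniquePair(string1, string2):
--     charSet = set()
--
--     for c in string1:
--         if c in charSet:
--             return False
--         else:
--             charSet.add(c)
--     for c2 in string2:
--         if c2 in charSet:
--             return False
--         else:
--             charSet.add(c2)
--     return True
-- ===== SOURCE B (Python) =====
-- def uniquePair(string1, string2):
--     s = string1 + string2
--     return len(set(s)) == len(s)
-- ===== Notes on version B (the rewrite author's own statement) =====
-- stated objective: idiomatic
-- what changed: Replaced the two incremental membership-test loops with early returns by concatenating the strings and comparing len(set(s)) with len(s).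
import Mathlib
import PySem

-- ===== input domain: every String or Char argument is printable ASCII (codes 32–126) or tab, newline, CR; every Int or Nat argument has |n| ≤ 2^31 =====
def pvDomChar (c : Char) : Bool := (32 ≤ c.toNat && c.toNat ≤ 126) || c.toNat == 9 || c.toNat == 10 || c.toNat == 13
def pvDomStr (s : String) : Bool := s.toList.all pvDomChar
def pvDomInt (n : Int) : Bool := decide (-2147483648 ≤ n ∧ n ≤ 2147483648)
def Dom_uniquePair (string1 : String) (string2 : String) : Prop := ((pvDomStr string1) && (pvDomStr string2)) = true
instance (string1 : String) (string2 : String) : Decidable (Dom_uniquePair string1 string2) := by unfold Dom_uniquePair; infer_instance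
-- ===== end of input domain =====

-- B replaces A's two early-return membership loops by one set-size comparison on the concatenation (idiomatic; same asymptotic cost).

-- ===== PORT A =====
-- one for-loop of A: walk the chars, return False (none) on a repeat, else keep adding to the set
def pvLoopA (cs : List Char) (s : PySem.Set Char) : Option (PySem.Set Char) :=
  match cs with
  | [] => some s
  | c :: rest =>
      if PySem.Set.contains s c then none
      else pvLoopA rest (PySem.Set.add s c)

def uniquePair (string1 : String) (string2 : String) : Bool :=
  match pvLoopA string1.toList PySem.Set.empty with
  | none => false
  | some charSet =>
      match pvLoopA string2.toList charSet with
      | none => false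
      | some _ => true

-- ===== PORT B =====
def uniquePair_alt (string1 : String) (string2 : String) : Bool :=
  let s := string1 ++ string2
  (PySem.Set.ofList s.toList).length == s.toList.length

-- ===== PRECONDITION & SPEC =====
def Spec_uniquePair (string1 : String) (string2 : String) (out : Bool) : Prop := out = uniquePair_alt string1 string2
instance (string1 : String) (string2 : String) (out : Bool) : Decidable (Spec_uniquePair string1 string2 out) := by unfold Spec_uniquePair; infer_instance

-- ===== CLAIM (what is proved, stated in full; the proofs are below) =====
def Claim_equal_uniquePair : Prop := ∀ (string1 : String) (string2 : String), Dom_uniquePair string1 string2 → Spec_uniquePair string1 string2 (uniquePair string1 string2)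

-- ===== LEMMAS AND PROOFS =====

-- A's loop succeeds on `acc ++ cs` nodup, returning the accumulated list, else fails
theorem pvLoopA_spec (cs : List Char) (acc : PySem.Set Char) (h : acc.Nodup) :
    pvLoopA cs acc = if (acc ++ cs).Nodup then some (acc ++ cs) else none := by
  induction cs generalizing acc with
  | nil => simp [pvLoopA, h]
  | cons c rest ih =>
    simp only [pvLoopA]
    by_cases hc : c ∈ acc
    · have : ¬ (acc ++ c :: rest).Nodup := by
        intro hn
        exact (List.disjoint_of_nodup_append hn) hc (List.mem_cons_self ..)
      simp [hc, this]
    · have hadd : PySem.Set.add acc c = acc ++ [c] := PySem.Set.add_of_not_mem hc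
      have hn : (acc ++ [c]).Nodup := by
        simp only [List.nodup_append, List.nodup_singleton, true_and]
        refine ⟨h, ?_⟩
        intro a ha b hb
        simp only [List.mem_singleton] at hb
        subst hb
        exact fun heq => hc (heq ▸ ha)
      rw [if_neg (by simp [hc]), hadd, ih _ hn]
      simp [List.append_assoc]

theorem uniquePair_eq_nodup (string1 string2 : String) :
    uniquePair string1 string2 = decide (string1.toList ++ string2.toList).Nodup := by
  unfold uniquePair
  rw [show PySem.Set.empty = ([] : List Char) from rfl,
      pvLoopA_spec string1.toList [] List.nodup_nil]
  simp only [List.nil_append]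
  by_cases h1 : string1.toList.Nodup
  · by_cases h2 : (string1.toList ++ string2.toList).Nodup
    · simp [h1, pvLoopA_spec string2.toList string1.toList h1, h2]
    · simp [h1, pvLoopA_spec string2.toList string1.toList h1, h2]
  · have : ¬ (string1.toList ++ string2.toList).Nodup := by
      intro hn; exact h1 hn.of_append_left
    simp [h1, this]

theorem length_ofList_eq_iff (l : List Char) :
    ((PySem.Set.ofList l).length = l.length) ↔ l.Nodup := by
  constructor
  · intro h
    have hcard : (PySem.Set.ofList l).toFinset = l.toFinset := by
      ext x; simp [PySem.Set.mem_ofList]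
    have h1 : (PySem.Set.ofList l).toFinset.card = (PySem.Set.ofList l).length :=
      List.toFinset_card_of_nodup (PySem.Set.nodup_ofList l)
    have h2 : l.dedup.length = l.length := by
      rw [← List.card_toFinset, ← hcard, h1, h]
    have h3 : l.dedup = l := (List.dedup_sublist l).eq_of_length h2
    exact List.dedup_eq_self.mp h3
  · intro h; rw [PySem.Set.ofList_eq_self_of_nodup l h]

theorem uniquePair_alt_eq_nodup (string1 string2 : String) :
    uniquePair_alt string1 string2 = decide (string1.toList ++ string2.toList).Nodup := by
  show ((PySem.Set.ofList (string1 ++ string2).toList).length == (string1 ++ string2).toList.length)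
      = decide (string1.toList ++ string2.toList).Nodup
  rw [show (string1 ++ string2).toList = string1.toList ++ string2.toList by simp]
  by_cases h : (string1.toList ++ string2.toList).Nodup
  · simp [h, (length_ofList_eq_iff _).mpr h]
  · simp only [h, decide_false, beq_eq_false_iff_ne]
    intro hlen
    exact h ((length_ofList_eq_iff _).mp hlen)

-- ===== VERDICT (by name: the statement is the Claim_ definition above) =====
theorem uniquePair_spec : Claim_equal_uniquePair := by
  intro string1 string2 _
  unfold Spec_uniquePair
  rw [uniquePair_eq_nodup, uniquePair_alt_eq_nodup]
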